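-- pv_equiv track=rewrite | github.com/dhmit/gender_analysis | gender_analysis/analysis/gender_adjective.py | get_overlapping_adjectives_raw_results
-- ===== SOURCE A (Python) =====
-- def get_overlapping_adjectives_raw_results(merged_results):
--     """
--     Looks through the gendered adjectives across the corpus and extracts adjectives that overlap
--     that overlap across all genders and their occurrences.
--     FORMAT - {'adjective': [gender1, gender2, ...]}
--     :param merged_results: the results of merge_raw_results.
--     :return: dict in form {'adjective': ['gender1': occurrences, 'gender2': occurrences, ... }}
--
--     TODO: Consider adding a more granular function that gets all sub-intersections.
--     """
--
--     overlap_results = {}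
--     genders = list(merged_results.keys())
--     sets_of_adjectives = {}
--
--     for gender in genders:
--         sets_of_adjectives[gender] = set(list(merged_results[gender].keys()))
--
--     intersects_with_all = set.intersection(*sets_of_adjectives.values())
--
--     for adj in intersects_with_all:
--         output = []
--         for gender in genders:
--             output.append(merged_results[gender][adj])
--         overlap_results[adj] = output
--
--     return overlap_results
-- ===== SOURCE B (Python) =====
-- def get_overlapping_adjectives_raw_results(merged_results):
--     num_genders = len(merged_results)
--     tally = {}
--     for results in merged_results.values():
--         for adj in results:
--             tally[adj] = tally.get(adj, 0) + 1
--     overlap_results = {}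
--     for adj, count in tally.items():
--         if count == num_genders:
--             overlap_results[adj] = [merged_results[gender][adj]
--                                     for gender in merged_results]
--     return overlap_results
-- ===== Notes on version B (the rewrite author's own statement) =====
-- stated objective: alternative
-- what changed: Replaces per-gender set construction plus set.intersection with a single counting pass (one tally dict over all adjective keys) and a threshold filter tally == len(merged_results); Pre_ excludes only the empty dict, on which A raises TypeError (set.intersection with no arguments), and association lists with duplicate keys, which do not represent a Python dict.
import Mathlib
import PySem

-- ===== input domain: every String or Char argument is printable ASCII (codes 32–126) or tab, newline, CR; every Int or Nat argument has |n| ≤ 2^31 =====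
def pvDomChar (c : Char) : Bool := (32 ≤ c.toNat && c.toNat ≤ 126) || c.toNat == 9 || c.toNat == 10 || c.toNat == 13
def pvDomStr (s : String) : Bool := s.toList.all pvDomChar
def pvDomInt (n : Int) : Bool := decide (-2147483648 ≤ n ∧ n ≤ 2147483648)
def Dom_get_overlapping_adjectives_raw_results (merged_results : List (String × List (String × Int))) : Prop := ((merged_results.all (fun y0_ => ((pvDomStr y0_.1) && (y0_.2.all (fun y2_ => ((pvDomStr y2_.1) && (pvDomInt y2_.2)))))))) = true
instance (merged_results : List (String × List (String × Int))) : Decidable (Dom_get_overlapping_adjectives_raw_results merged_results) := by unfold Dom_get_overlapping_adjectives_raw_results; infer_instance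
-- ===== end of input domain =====

-- B replaces A's per-gender sets + set.intersection with one counting pass over all
-- adjective keys and a threshold filter (tally == number of genders): alternative
-- decomposition, same asymptotic cost. The ports return dicts as association lists;
-- Python iterates A's result set in hash order, which dict-valued results are compared
-- ignoring order, so both ports emit first-gender key order.

-- ===== PORT A =====
def get_overlapping_adjectives_raw_results (merged_results : List (String × List (String × Int))) : List (String × List Int) :=
  let genders := merged_results.map Prod.fst
  let setsOfAdjectives := genders.map (fun gender =>
    PySem.Set.ofList (((PySem.Dict.mk merged_results).getD gender []).map Prod.fst))
  match setsOfAdjectives with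
  | [] => []  -- unreachable under Pre_: Python's set.intersection(*[]) raises TypeError here
  | s0 :: rest =>
    let intersectsWithAll := rest.foldl PySem.Set.inter s0
    intersectsWithAll.foldl (fun overlap adj =>
      let output := genders.foldl (fun out gender =>
        out ++ [(PySem.Dict.mk ((PySem.Dict.mk merged_results).getD gender [])).getD adj 0]) []
      overlap ++ [(adj, output)]) []

-- ===== PORT B =====
def get_overlapping_adjectives_raw_results_alt (merged_results : List (String × List (String × Int))) : List (String × List Int) :=
  let numGenders : Int := merged_results.length
  let tally : PySem.Dict String Int :=
    (merged_results.map Prod.snd).foldl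
      (fun t results => results.foldl (fun t q => t.modify q.1 0 (· + 1)) t)
      PySem.Dict.empty
  tally.items.foldl
    (fun overlap pr =>
      if pr.2 == numGenders then
        overlap ++ [(pr.1, (merged_results.map Prod.fst).map (fun gender =>
          (PySem.Dict.mk ((PySem.Dict.mk merged_results).getD gender [])).getD pr.1 0))]
      else overlap)
    []

-- ===== PRECONDITION & SPEC =====
-- Pre_ excludes (i) the empty dict, on which the Python A raises TypeError
-- (set.intersection with no arguments), and (ii) association lists whose outer or inner
-- key lists repeat a key — those do not represent any Python dict, so A never runs on them.
def Pre_get_overlapping_adjectives_raw_results (merged_results : List (String × List (String × Int))) : Prop :=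
  merged_results ≠ [] ∧ (merged_results.map Prod.fst).Nodup ∧
    ∀ p ∈ merged_results, (p.2.map Prod.fst).Nodup
instance (merged_results : List (String × List (String × Int))) : Decidable (Pre_get_overlapping_adjectives_raw_results merged_results) := by unfold Pre_get_overlapping_adjectives_raw_results; infer_instance

def pvWitness_get_overlapping_adjectives_raw_results : (List (String × List (String × Int))) :=
  [("male", [("tall", 3), ("kind", 1)]), ("female", [("kind", 2), ("shy", 4)])]

def Spec_get_overlapping_adjectives_raw_results (merged_results : List (String × List (String × Int))) (out : List (String × List Int)) : Prop := out = get_overlapping_adjectives_raw_results_alt merged_results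
instance (merged_results : List (String × List (String × Int))) (out : List (String × List Int)) : Decidable (Spec_get_overlapping_adjectives_raw_results merged_results out) := by unfold Spec_get_overlapping_adjectives_raw_results; infer_instance

-- ===== CLAIM (what is proved, stated in full; the proofs are below) =====
def Claim_equal_get_overlapping_adjectives_raw_results : Prop := ∀ (merged_results : List (String × List (String × Int))), Dom_get_overlapping_adjectives_raw_results merged_results → Pre_get_overlapping_adjectives_raw_results merged_results → Spec_get_overlapping_adjectives_raw_results merged_results (get_overlapping_adjectives_raw_results merged_results)


-- ===== LEMMAS AND PROOFS =====

lemma pv_foldl_inter {α : Type} [BEq α] (ts : List (PySem.Set α)) (s0 : PySem.Set α) :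
    ts.foldl PySem.Set.inter s0 = s0.filter (fun x => ts.all (fun t => PySem.Set.contains t x)) := by
  induction ts generalizing s0 with
  | nil => simp
  | cons t ts ih =>
      simp only [List.foldl_cons, ih, PySem.Set.inter, List.filter_filter, List.all_cons]
      exact List.filter_congr (fun x _ => Bool.and_comm _ _)

lemma pv_count_flatMap (ms : List (String × List (String × Int))) (x : String)
    (h : ∀ p ∈ ms, (p.2.map Prod.fst).Nodup) :
    (ms.flatMap (fun p => p.2.map Prod.fst)).count x
      = ms.countP (fun p => decide (x ∈ p.2.map Prod.fst)) := by
  induction ms with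
  | nil => simp
  | cons p ms ih =>
      simp only [List.flatMap_cons, List.count_append, List.countP_cons]
      rw [ih (fun q hq => h q (List.mem_cons_of_mem _ hq))]
      by_cases hm : x ∈ p.2.map Prod.fst
      · rw [List.count_eq_one_of_mem (h p (List.mem_cons_self)) hm]
        simp [hm, Nat.add_comm]
      · rw [List.count_eq_zero.mpr hm]
        simp [hm]

lemma pv_contains_ofList {α : Type} [BEq α] [LawfulBEq α] (l : List α) (x : α) :
    (PySem.Set.ofList l).contains x = l.contains x := by
  rw [Bool.eq_iff_iff]
  simp [PySem.Set.mem_ofList]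

lemma pv_row (m : List (String × List (String × Int))) (hnd : (m.map Prod.fst).Nodup)
    {p : String × List (String × Int)} (hp : p ∈ m) :
    (PySem.Dict.mk m).getD p.1 [] = p.2 := by
  have hmem : (p.1, p.2) ∈ (PySem.Dict.mk m).items := by simpa using hp
  refine PySem.Dict.getD_of_mem_items _ hmem ?_ _
  simpa [PySem.Dict.keys_mk] using hnd

-- ===== VERDICT (by name: the statement is the Claim_ definition above) =====
theorem get_overlapping_adjectives_raw_results_spec : Claim_equal_get_overlapping_adjectives_raw_results := by
  intro m _ hpre
  obtain ⟨hne, hnd, hin⟩ := hpre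
  show get_overlapping_adjectives_raw_results m = get_overlapping_adjectives_raw_results_alt m
  obtain ⟨p0, ms, rfl⟩ := List.exists_cons_of_ne_nil hne
  have hrow : ∀ p ∈ (p0 :: ms), (PySem.Dict.mk (p0 :: ms)).getD p.1 [] = p.2 :=
    fun p hp => pv_row _ hnd hp
  have hA : get_overlapping_adjectives_raw_results (p0 :: ms)
      = ((p0.2.map Prod.fst).filter
            (fun x => ms.all (fun p => List.contains (p.2.map Prod.fst) x))).map
          (fun adj => (adj, ((p0 :: ms).map Prod.fst).map (fun gender =>
            (PySem.Dict.mk ((PySem.Dict.mk (p0 :: ms)).getD gender [])).getD adj 0))) := by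
    simp only [get_overlapping_adjectives_raw_results, List.map_cons]
    rw [hrow p0 (List.mem_cons_self), pv_foldl_inter]
    simp only [PySem.List.foldl_append_singleton_eq_map, List.nil_append]
    rw [PySem.Set.ofList_eq_self_of_nodup _ (hin p0 (List.mem_cons_self))]
    have hrest : (ms.map Prod.fst).map (fun g =>
        PySem.Set.ofList (((PySem.Dict.mk (p0 :: ms)).getD g []).map Prod.fst))
        = ms.map (fun p => PySem.Set.ofList (p.2.map Prod.fst)) := by
      rw [List.map_map]
      exact List.map_congr_left (fun p hp => by
        simp only [Function.comp_apply, hrow p (List.mem_cons_of_mem _ hp)])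
    rw [hrest]
    simp only [List.all_map, Function.comp_def, pv_contains_ofList, List.map_cons]
    rw [hrow p0 (List.mem_cons_self)]
  have hitems : ∀ (L : List String),
      ((L.foldl (fun d x => d.modify x 0 (· + 1)) (PySem.Dict.empty : PySem.Dict String Int)).items : List (String × Int))
        = (PySem.Set.ofList L).map (fun k => (k, (L.count k : Int))) := by
    intro L
    have hkeys : (L.foldl (fun d x => d.modify x 0 (· + 1)) (PySem.Dict.empty : PySem.Dict String Int)).keys
        = PySem.Set.ofList L := by
      rw [PySem.Dict.keys_foldl_modify L 0 (fun _ _ v => v + 1)]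
      simp [PySem.Dict.empty, PySem.Dict.keys_mk, PySem.Set.update_nil_left]
    have hnodk : (L.foldl (fun d x => d.modify x 0 (· + 1)) (PySem.Dict.empty : PySem.Dict String Int)).keys.Nodup := by rw [hkeys]; exact PySem.Set.nodup_ofList (xs := L)
    have h1 := PySem.Dict.items_eq_map_keys (L.foldl (fun d x => d.modify x 0 (· + 1)) (PySem.Dict.empty : PySem.Dict String Int)) hnodk (0 : Int)
    rw [hkeys] at h1
    refine h1.trans (List.map_congr_left (fun k hk => ?_))
    rw [PySem.Dict.getD_foldl_modify_add_one]
    simp [PySem.Dict.getD_empty]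
  have hB : get_overlapping_adjectives_raw_results_alt (p0 :: ms)
      = ((PySem.Set.ofList ((p0 :: ms).flatMap (fun p => p.2.map Prod.fst))).filter
            (fun k => ((((p0 :: ms).flatMap (fun p => p.2.map Prod.fst)).count k : Int)
              == ((p0 :: ms).length : Int)))).map
          (fun adj => (adj, ((p0 :: ms).map Prod.fst).map (fun gender =>
            (PySem.Dict.mk ((PySem.Dict.mk (p0 :: ms)).getD gender [])).getD adj 0))) := by
    simp only [get_overlapping_adjectives_raw_results_alt]
    rw [List.foldl_map, ← List.foldl_flatMap,
        ← List.foldl_map (f := Prod.fst) (g := fun (d : PySem.Dict String Int) x => d.modify x 0 (· + 1)),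
        List.map_flatMap, hitems, PySem.List.foldl_append_if, List.nil_append, List.filter_map,
        List.map_map]
    simp only [Function.comp_def]
  rw [hA, hB]
  have hnd0 : (p0.2.map Prod.fst).Nodup := hin p0 (List.mem_cons_self)
  have hinms : ∀ p ∈ ms, (p.2.map Prod.fst).Nodup :=
    fun p hp => hin p (List.mem_cons_of_mem _ hp)
  have hLc : (p0 :: ms).flatMap (fun p => p.2.map Prod.fst)
      = p0.2.map Prod.fst ++ ms.flatMap (fun p => p.2.map Prod.fst) := List.flatMap_cons ..
  rw [hLc, PySem.Set.ofList_append, PySem.Set.update_eq_append_filter,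
      PySem.Set.ofList_eq_self_of_nodup _ hnd0, List.filter_append]
  have hextra : List.filter
      (fun k => ((((p0.2.map Prod.fst) ++ ms.flatMap (fun p => p.2.map Prod.fst)).count k : Int)
        == ((p0 :: ms).length : Int)))
      (List.filter (fun y => !PySem.Set.contains (p0.2.map Prod.fst) y)
        (PySem.Set.ofList (ms.flatMap (fun p => p.2.map Prod.fst)))) = [] := by
    refine List.filter_eq_nil_iff.mpr (fun y hy => ?_)
    rw [List.mem_filter] at hy
    have hynot : y ∉ p0.2.map Prod.fst := by simpa [PySem.Set.contains] using hy.2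
    have hcle : (ms.flatMap (fun p => p.2.map Prod.fst)).count y ≤ ms.length := by
      rw [pv_count_flatMap ms y hinms]; exact List.countP_le_length
    simp only [beq_iff_eq, List.count_append, List.count_eq_zero.mpr hynot, List.length_cons]
    intro h
    have h' : 0 + (ms.flatMap (fun p => p.2.map Prod.fst)).count y = ms.length + 1 := by
      exact_mod_cast h
    omega
  rw [hextra, List.append_nil]
  refine congrArg _ (List.filter_congr (fun x hx => ?_)).symm
  rw [Bool.eq_iff_iff]
  simp only [beq_iff_eq, List.all_eq_true, List.count_append, List.length_cons,
    List.count_eq_one_of_mem hnd0 hx, pv_count_flatMap ms x hinms]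
  constructor
  · intro h p hp
    have h' : 1 + ms.countP (fun p => decide (x ∈ p.2.map Prod.fst)) = ms.length + 1 := by
      exact_mod_cast h
    have := List.countP_eq_length.mp (by omega : ms.countP (fun p => decide (x ∈ p.2.map Prod.fst)) = ms.length) p hp
    simpa using this
  · intro h
    have : ms.countP (fun p => decide (x ∈ p.2.map Prod.fst)) = ms.length :=
      List.countP_eq_length.mpr (fun p hp => by simpa using h p hp)
    rw [this]
    push_cast
    ring
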